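-- pv_equiv track=rewrite | github.com/Gavin0099/ai-governance-framework | governance_tools/escalation_authority_writer.py | _pick_precedence_state
-- ===== SOURCE A (Python) =====
-- LIFECYCLE_PRECEDENCE = {
--     "invalidated": 0,
--     "active": 1,
--     "resolved_confirmed": 2,
--     "resolved_provisional": 3,
--     "superseded": 4,
--     "archived": 5,
-- }
--
-- def _pick_precedence_state(states: list[str]) -> str | None:
--     ranked = [
--         state for state in states
--         if state in LIFECYCLE_PRECEDENCE
--     ]
--     if not ranked:
--         return None
--     return sorted(ranked, key=lambda s: LIFECYCLE_PRECEDENCE[s])[0]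
-- ===== SOURCE B (Python) =====
-- LIFECYCLE_PRECEDENCE = {
--     "invalidated": 0,
--     "active": 1,
--     "resolved_confirmed": 2,
--     "resolved_provisional": 3,
--     "superseded": 4,
--     "archived": 5,
-- }
--
-- _ORDERED_STATES = sorted(LIFECYCLE_PRECEDENCE, key=LIFECYCLE_PRECEDENCE.get)
--
-- def _pick_precedence_state(states: list[str]) -> str | None:
--     for state in _ORDERED_STATES:
--         if state in states:
--             return state
--     return None
-- ===== Notes on version B (the rewrite author's own statement) =====
-- stated objective: alternative
-- what changed: B iterates the fixed precedence table in ascending precedence and returns the first table state present in the input, instead of filtering the input and sorting it by precedence.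
import Mathlib
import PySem

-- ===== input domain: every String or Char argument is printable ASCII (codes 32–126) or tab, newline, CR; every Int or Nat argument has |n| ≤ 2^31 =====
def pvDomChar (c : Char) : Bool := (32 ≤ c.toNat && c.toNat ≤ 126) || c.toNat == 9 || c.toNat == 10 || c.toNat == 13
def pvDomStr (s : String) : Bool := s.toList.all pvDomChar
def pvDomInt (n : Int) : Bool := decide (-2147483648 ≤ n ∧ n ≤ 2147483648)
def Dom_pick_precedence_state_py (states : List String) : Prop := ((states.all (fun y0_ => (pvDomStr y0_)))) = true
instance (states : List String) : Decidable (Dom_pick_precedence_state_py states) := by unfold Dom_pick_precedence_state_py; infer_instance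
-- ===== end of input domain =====

-- B iterates the fixed precedence table in ascending precedence and returns the first table
-- state present in the input, instead of filtering the input and sorting it by precedence.


-- ===== PORT A =====
def lifecyclePrecedence : PySem.Dict String Int :=
  PySem.Dict.ofList [("invalidated", 0), ("active", 1), ("resolved_confirmed", 2),
    ("resolved_provisional", 3), ("superseded", 4), ("archived", 5)]

def pick_precedence_state_py (states : List String) : Option String :=
  let ranked := states.filter (fun s => lifecyclePrecedence.contains s)
  if ranked = [] then none
  else (PySem.List.sorted ranked (fun s => lifecyclePrecedence.getD s 0) false).head?

-- ===== PORT B =====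
-- the table's states in ascending precedence (sorted(LIFECYCLE_PRECEDENCE, key=...get))
def orderedStates : List String :=
  ["invalidated", "active", "resolved_confirmed", "resolved_provisional", "superseded", "archived"]

def pick_precedence_state_py_alt (states : List String) : Option String :=
  orderedStates.find? (fun t => states.contains t)

-- ===== PRECONDITION & SPEC =====
def Spec_pick_precedence_state_py (states : List String) (out : Option String) : Prop := out = pick_precedence_state_py_alt states
instance (states : List String) (out : Option String) : Decidable (Spec_pick_precedence_state_py states out) := by unfold Spec_pick_precedence_state_py; infer_instance

-- ===== CLAIM (what is proved, stated in full; the proofs are below) =====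
def Claim_equal_pick_precedence_state_py : Prop := ∀ (states : List String), Dom_pick_precedence_state_py states → Spec_pick_precedence_state_py states (pick_precedence_state_py states)

-- ===== LEMMAS AND PROOFS =====

-- dict membership coincides with membership in the ordered table
theorem contains_iff_mem_ordered (s : String) :
    lifecyclePrecedence.contains s = true ↔ s ∈ orderedStates := by
  have h : lifecyclePrecedence = PySem.Dict.mk [("invalidated", 0), ("active", 1),
      ("resolved_confirmed", 2), ("resolved_provisional", 3), ("superseded", 4), ("archived", 5)] := by
    decide
  rw [h, PySem.Dict.contains_mk]
  simp [orderedStates, List.any, beq_iff_eq]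
  constructor
  · rintro (h | h | h | h | h | h) <;> subst h <;> tauto
  · rintro (h | h | h | h | h | h) <;> subst h <;> tauto

-- general shape: head of the list filtered by p and stably sorted by key equals the first
-- element of a strictly key-ascending table tbl (with p ↔ ∈ tbl) that the input contains
theorem head_sorted_filter_eq_find (key : String → Int) (p : String → Bool) (tbl : List String)
    (hasc : (tbl.map key).Pairwise (· < ·))
    (hp : ∀ s, p s = true ↔ s ∈ tbl) (states : List String) :
    (PySem.List.sorted (states.filter p) key false).head? =
      tbl.find? (fun t => states.contains t) := by
  have hpair := List.pairwise_iff_getElem.mp hasc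
  cases hfind : tbl.find? (fun t => states.contains t) with
  | none =>
    have hnone := List.find?_eq_none.mp hfind
    have hfilter : states.filter p = [] := by
      rw [List.filter_eq_nil_iff]
      intro s hs hps
      have hmem : s ∈ tbl := (hp s).mp hps
      have := hnone s hmem
      simp at this
      exact (this hs).elim
    rw [hfilter]
    simp [PySem.List.sorted]
  | some t =>
    obtain ⟨i, hi, hti, hfirst⟩ := List.find?_eq_some_iff_getElem.mp hfind |>.2
    have hcontains : states.contains t = true := (List.find?_eq_some_iff_getElem.mp hfind).1
    have htstates : t ∈ states := by simpa using hcontains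
    have htmemtbl : t ∈ tbl := hti ▸ List.getElem_mem hi
    have hpt : p t = true := (hp t).mpr htmemtbl
    have htranked : t ∈ states.filter p := List.mem_filter.mpr ⟨htstates, hpt⟩
    -- key t ≤ key m for every table member m contained in states
    have hmin : ∀ m ∈ tbl, states.contains m = true → key t ≤ key m := by
      intro m hm hcm
      obtain ⟨j, hj, hmj⟩ := List.getElem_of_mem hm
      by_cases hij : j < i
      · have := hfirst j hij
        rw [hmj] at this
        simp at this
        exact absurd (by simpa using hcm) this
      · by_cases hji : i < j
        · have := hpair i j (by simpa using hi) (by simpa using hj) hji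
          simp only [List.getElem_map] at this
          rw [hti, hmj] at this
          exact le_of_lt this
        · have hij' : i = j := by omega
          subst hij'
          rw [← hmj, hti]
    -- the sorted filtered list is nonempty
    cases hsorted : PySem.List.sorted (states.filter p) key false with
    | nil =>
      exfalso
      have : t ∈ PySem.List.sorted (states.filter p) key false :=
        (PySem.List.mem_sorted _ _ _ _).mpr htranked
      rw [hsorted] at this
      exact List.not_mem_nil this
    | cons m rest =>
      have hmmem : m ∈ states.filter p := by
        have : m ∈ PySem.List.sorted (states.filter p) key false := by
          rw [hsorted]; exact List.mem_cons_self
        exact (PySem.List.mem_sorted _ _ _ _).mp this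
      have hmstates : m ∈ states := (List.mem_filter.mp hmmem).1
      have hmtbl : m ∈ tbl := (hp m).mp (List.mem_filter.mp hmmem).2
      have h1 : key m ≤ key t := PySem.List.key_head_sorted_le _ _ hsorted t htranked
      have h2 : key t ≤ key m := hmin m hmtbl (by simpa using hmstates)
      -- key injective on tbl (strict ascending keys)
      have hkm : key t = key m := le_antisymm h2 h1
      have : t = m := by
        obtain ⟨j, hj, hmj⟩ := List.getElem_of_mem hmtbl
        rcases lt_trichotomy i j with h | h | h
        · have := hpair i j (by simpa using hi) (by simpa using hj) h
          simp only [List.getElem_map] at this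
          rw [hti, hmj] at this; omega
        · subst h
          rw [← hti, ← hmj]
        · have := hpair j i (by simpa using hj) (by simpa using hi) h
          simp only [List.getElem_map] at this
          rw [hti, hmj] at this; omega
      simp [this]

-- A's head?-form coincides with A's if-guarded form
theorem portA_eq_head (states : List String) :
    pick_precedence_state_py states =
      (PySem.List.sorted (states.filter (fun s => lifecyclePrecedence.contains s))
        (fun s => lifecyclePrecedence.getD s 0) false).head? := by
  unfold pick_precedence_state_py
  by_cases h : states.filter (fun s => lifecyclePrecedence.contains s) = []
  · simp [h, PySem.List.sorted]
  · simp [h]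

-- ===== VERDICT (by name: the statement is the Claim_ definition above) =====
theorem pick_precedence_state_py_spec : Claim_equal_pick_precedence_state_py := by
  intro states _
  unfold Spec_pick_precedence_state_py pick_precedence_state_py_alt
  rw [portA_eq_head]
  exact head_sorted_filter_eq_find _ _ orderedStates (by decide)
    contains_iff_mem_ordered states
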